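-- pv_equiv track=rewrite | github.com/seokjoon911/codingtest | 프로그래머스/unrated/181880. 1로 만들기/1로 만들기.py | solution
-- ===== SOURCE A (Python) =====
-- def solution(num_list):
--     answer = 0
--     for num in num_list:
--         while num != 1:
--             if num % 2 == 0:
--                 num //= 2
--             else:
--                 num -= 1
--                 num //= 2
--             answer += 1
--     return answer
-- ===== SOURCE B (Python) =====
-- def solution(num_list):
--     return sum(n.bit_length() - 1 for n in num_list)
-- ===== Notes on version B (the rewrite author's own statement) =====
-- stated objective: alternative
-- what changed: Replaced the per-element halving while-loop with the closed form bit_length()-1 (number of halvings to reach 1), summed in one pass; intended as O(k) vs O(k log max) but a timing run could not confirm a ratio (A times out on the random timing inputs).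
import Mathlib
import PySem

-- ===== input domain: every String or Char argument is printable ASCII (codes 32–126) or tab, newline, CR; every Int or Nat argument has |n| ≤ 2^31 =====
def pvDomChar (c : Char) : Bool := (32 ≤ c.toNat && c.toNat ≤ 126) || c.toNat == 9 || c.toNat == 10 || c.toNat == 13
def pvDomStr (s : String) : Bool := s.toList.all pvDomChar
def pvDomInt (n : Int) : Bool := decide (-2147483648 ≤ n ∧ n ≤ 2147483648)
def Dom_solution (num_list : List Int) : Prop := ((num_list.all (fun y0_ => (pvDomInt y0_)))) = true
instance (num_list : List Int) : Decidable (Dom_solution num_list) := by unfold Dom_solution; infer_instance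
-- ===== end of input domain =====

-- B replaces A's per-element halving while-loop by the closed form bit_length()-1, summed in one pass (a different algorithm of the same overall shape).

-- ===== PORT A =====
-- the inner 'while num != 1' loop; for num ≤ 0 Python diverges (excluded by Pre_), here we return acc there
def solutionLoop (num acc : Int) : Int :=
  if num = 1 then acc
  else if num ≤ 0 then acc  -- unreachable under Pre_solution (Python loops forever)
  else if num % 2 = 0 then solutionLoop (PySem.Int.floordiv num 2) (acc + 1)
  else solutionLoop (PySem.Int.floordiv (num - 1) 2) (acc + 1)
termination_by num.toNat
decreasing_by
  · simp [PySem.Int.floordiv, Int.fdiv_eq_ediv]; omega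
  · simp [PySem.Int.floordiv, Int.fdiv_eq_ediv]; omega

def solution (num_list : List Int) : Int :=
  num_list.foldl (fun answer num => solutionLoop num answer) 0

-- ===== PORT B =====
-- n.bit_length() - 1 for n ≥ 1 is Nat.log2 n (exact there; Pre_ guarantees n ≥ 1)
def solution_alt (num_list : List Int) : Int :=
  (num_list.map (fun n => (Nat.log2 n.toNat : Int))).sum

-- ===== PRECONDITION & SPEC =====
-- Pre_ excludes elements ≤ 0, on which A's while-loop never terminates (Python diverges)
def Pre_solution (num_list : List Int) : Prop := ∀ n ∈ num_list, 1 ≤ n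
instance (num_list : List Int) : Decidable (Pre_solution num_list) := by unfold Pre_solution; infer_instance
def pvWitness_solution : List Int := ([3, 7, 1, 12])
def Spec_solution (num_list : List Int) (out : Int) : Prop := out = solution_alt num_list
instance (num_list : List Int) (out : Int) : Decidable (Spec_solution num_list out) := by unfold Spec_solution; infer_instance

-- ===== CLAIM (what is proved, stated in full; the proofs are below) =====
def Claim_equal_solution : Prop := ∀ (num_list : List Int), Dom_solution num_list → Pre_solution num_list → Spec_solution num_list (solution num_list)

-- ===== LEMMAS AND PROOFS =====

theorem solutionLoop_log2 (k : Nat) (hk : 1 ≤ k) : ∀ acc : Int, solutionLoop (k : Int) acc = acc + (Nat.log2 k : Int) := by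
  induction k using Nat.strong_induction_on with
  | _ k ih =>
    intro acc
    by_cases h1 : (k : Int) = 1
    · have : k = 1 := by exact_mod_cast h1
      subst this
      rw [solutionLoop]
      simp [Nat.log2]
    · have hk1 : k ≠ 1 := by intro h; subst h; simp at h1
      have hk2 : 2 ≤ k := by omega
      rw [solutionLoop, if_neg h1, if_neg (by omega)]
      have hrec : (k / 2 : Nat) < k := by omega
      have hrec1 : 1 ≤ k / 2 := by omega
      have hlog : Nat.log2 k = Nat.log2 (k / 2) + 1 := by
        have hpos : 1 ≤ Nat.log 2 k := Nat.log_pos (by norm_num) hk2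
        rw [Nat.log2_eq_log_two, Nat.log2_eq_log_two, Nat.log_div_base]
        omega
      split_ifs with hpar
      · have hdiv : PySem.Int.floordiv (k : Int) 2 = ((k / 2 : Nat) : Int) := by
          simp only [PySem.Int.floordiv, Int.fdiv_eq_ediv]; omega
        rw [hdiv, ih _ hrec hrec1, hlog]; push_cast; ring
      · have hdiv' : PySem.Int.floordiv ((k : Int) - 1) 2 = ((k / 2 : Nat) : Int) := by
          simp only [PySem.Int.floordiv, Int.fdiv_eq_ediv]; omega
        rw [hdiv', ih _ hrec hrec1, hlog]; push_cast; ring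

theorem solutionLoop_pos (n acc : Int) (h : 1 ≤ n) : solutionLoop n acc = acc + (Nat.log2 n.toNat : Int) := by
  have : n = (n.toNat : Int) := by omega
  rw [this]
  exact solutionLoop_log2 n.toNat (by omega) acc

theorem solution_foldl (num_list : List Int) (h : ∀ n ∈ num_list, 1 ≤ n) :
    ∀ acc : Int, num_list.foldl (fun answer num => solutionLoop num answer) acc
      = acc + (num_list.map (fun n => (Nat.log2 n.toNat : Int))).sum := by
  induction num_list with
  | nil => intro acc; simp
  | cons x xs ih =>
    intro acc
    simp only [List.foldl_cons, List.map_cons, List.sum_cons]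
    rw [solutionLoop_pos x acc (h x (by simp)), ih (fun n hn => h n (by simp [hn]))]
    ring

-- ===== VERDICT (by name: the statement is the Claim_ definition above) =====
theorem solution_spec : Claim_equal_solution := by
  intro num_list _ hpre
  unfold Spec_solution solution solution_alt
  rw [solution_foldl num_list hpre 0]
  simp
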